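-- pv_equiv track=rewrite | github.com/Elias-Giannakidis/excel_calendar | Person.py | get6DaysSeriScore
-- ===== SOURCE A (Python) =====
-- def get6DaysSeriScore(calendar):
--     seri = 0
--     score = 0
--     for day in calendar:
--         if(day == 'repo'):
--             seri = 0
--         else:
--             seri = seri + 1
--     if(seri > 5):
--         score = score - 500
--     if(seri > 6):
--         score = score - 1000
--     return score
-- ===== SOURCE B (Python) =====
-- def get6DaysSeriScore(calendar):
--     seri = 0
--     for day in reversed(list(calendar)):
--         if day == 'repo':
--             break
--         seri += 1
--     score = 0
--     if seri > 5:
--         score -= 500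
--     if seri > 6:
--         score -= 1000
--     return score
-- ===== Notes on version B (the rewrite author's own statement) =====
-- stated objective: alternative
-- what changed: Computes the trailing non-'repo' streak by scanning from the end with early break at the first 'repo', instead of A's full forward pass with reset-to-zero accumulation; scoring thresholds are unchanged.
import Mathlib
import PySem

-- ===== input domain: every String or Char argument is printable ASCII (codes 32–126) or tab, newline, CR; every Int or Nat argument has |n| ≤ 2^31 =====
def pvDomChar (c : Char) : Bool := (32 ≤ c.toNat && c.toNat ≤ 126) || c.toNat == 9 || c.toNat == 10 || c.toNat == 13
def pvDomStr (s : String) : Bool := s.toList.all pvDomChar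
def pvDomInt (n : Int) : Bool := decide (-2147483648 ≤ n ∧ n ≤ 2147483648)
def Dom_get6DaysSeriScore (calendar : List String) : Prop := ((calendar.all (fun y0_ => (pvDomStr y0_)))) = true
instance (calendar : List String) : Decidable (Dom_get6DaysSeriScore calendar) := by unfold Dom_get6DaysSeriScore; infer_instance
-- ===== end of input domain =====

-- B scans the calendar from the end, breaking at the first 'repo', instead of A's
-- full forward reset-accumulate pass; same scoring, same return values (objective: alternative).


-- ===== PORT A =====
def get6DaysSeriScore (calendar : List String) : Int :=
  -- seri = 0; for day in calendar: seri = 0 if day == 'repo' else seri + 1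
  let seri : Int := calendar.foldl (fun seri day => if day == "repo" then 0 else seri + 1) 0
  let score : Int := 0
  let score := if seri > 5 then score - 500 else score
  let score := if seri > 6 then score - 1000 else score
  score

-- ===== PORT B =====
-- the reversed loop with 'break' at the first 'repo': count the prefix of the reversed list
def altStreak : List String → Int
  | [] => 0
  | day :: rest => if day == "repo" then 0 else altStreak rest + 1

def get6DaysSeriScore_alt (calendar : List String) : Int :=
  let seri : Int := altStreak calendar.reverse
  let score : Int := 0
  let score := if seri > 5 then score - 500 else score
  let score := if seri > 6 then score - 1000 else score
  score

-- ===== PRECONDITION & SPEC =====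
def Spec_get6DaysSeriScore (calendar : List String) (out : Int) : Prop := out = get6DaysSeriScore_alt calendar
instance (calendar : List String) (out : Int) : Decidable (Spec_get6DaysSeriScore calendar out) := by unfold Spec_get6DaysSeriScore; infer_instance

-- ===== CLAIM (what is proved, stated in full; the proofs are below) =====
def Claim_equal_get6DaysSeriScore : Prop := ∀ (calendar : List String), Dom_get6DaysSeriScore calendar → Spec_get6DaysSeriScore calendar (get6DaysSeriScore calendar)

-- ===== LEMMAS AND PROOFS =====
theorem seri_eq (l : List String) :
    l.foldl (fun seri day => if day == "repo" then (0:Int) else seri + 1) 0 = altStreak l.reverse := by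
  induction l using List.reverseRecOn with
  | nil => simp [altStreak]
  | append_singleton l d ih =>
    rw [List.foldl_append, ih]
    simp only [List.foldl, List.reverse_append, List.reverse_singleton, List.singleton_append,
      altStreak]

-- ===== VERDICT (by name: the statement is the Claim_ definition above) =====
theorem get6DaysSeriScore_spec : Claim_equal_get6DaysSeriScore := by
  intro calendar _
  unfold Spec_get6DaysSeriScore get6DaysSeriScore get6DaysSeriScore_alt
  rw [seri_eq]
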